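-- pv_equiv track=rewrite | github.com/njbergam/dhlab | flaskr/oldtools/twoText.py | wordProgression
-- ===== SOURCE A (Python) =====
-- def wordProgression(text, firstgen, secgen):
--     occurences = []
--     section = list(range(100))
--     ocount = 0
--     i = 0
--     while i < len(text):
--         j = i
--         while i < j + 100 and i < len(text):
--             if text[i] in firstgen:
--                 ocount += 4
--             elif text[i] in secgen:
--             	ocount += 1
--             i += 1
--         occurences.append(ocount)
--         ocount = 0
--     return occurences
-- ===== SOURCE B (Python) =====
-- def wordProgression(text, firstgen, secgen):
--     fg = set(firstgen)
--     sg = set(secgen)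
--     prefix = [0]
--     for x in text:
--         prefix.append(prefix[-1] + (4 if x in fg else 1 if x in sg else 0))
--     n = len(text)
--     return [prefix[min(i + 100, n)] - prefix[i] for i in range(0, n, 100)]
-- ===== Notes on version B (the rewrite author's own statement) =====
-- stated objective: faster
-- what changed: Replaces the nested while loops that re-scan each 100-element block with list-membership tests per element by one forward pass building a prefix-sum array of per-item weights (firstgen=4, elif secgen=1, membership via sets), then forms each block's count as a difference of two prefix entries; drops the dead `section` variable.
import Mathlib
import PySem

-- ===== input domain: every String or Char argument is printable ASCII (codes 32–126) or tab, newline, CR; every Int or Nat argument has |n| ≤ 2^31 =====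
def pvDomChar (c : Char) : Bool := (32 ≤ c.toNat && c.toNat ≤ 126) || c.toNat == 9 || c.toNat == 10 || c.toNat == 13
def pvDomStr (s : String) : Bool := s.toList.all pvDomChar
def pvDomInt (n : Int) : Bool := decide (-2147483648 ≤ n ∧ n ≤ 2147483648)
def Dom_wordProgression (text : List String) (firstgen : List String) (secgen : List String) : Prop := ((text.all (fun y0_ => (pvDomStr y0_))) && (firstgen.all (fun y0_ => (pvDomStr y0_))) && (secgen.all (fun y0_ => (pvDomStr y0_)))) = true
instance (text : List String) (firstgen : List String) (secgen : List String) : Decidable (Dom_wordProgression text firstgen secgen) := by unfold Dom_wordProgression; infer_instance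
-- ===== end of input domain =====

-- B replaces A's nested block-rescanning while loops by one prefix-sum pass plus
-- per-block subtraction of prefix boundaries (objective: alternative decomposition).

-- ===== PORT A =====
-- inner `while i < j + 100 and i < len(text)` loop; text[i] is in range under the
-- guard, so List.getD is exact for Python's text[i] here.
def wpInner (text : List String) (firstgen : List String) (secgen : List String)
    (j : Nat) (i : Nat) (ocount : Int) : Int × Nat :=
  if h : i < j + 100 ∧ i < text.length then
    wpInner text firstgen secgen j (i + 1)
      (if text.getD i "" ∈ firstgen then ocount + 4
       else if text.getD i "" ∈ secgen then ocount + 1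
       else ocount)
  else (ocount, i)
termination_by text.length - i
decreasing_by exact Nat.sub_succ_lt_self _ _ h.2

-- the inner loop never moves i backwards …
theorem wpInner_le (text : List String) (firstgen : List String) (secgen : List String) :
    ∀ (n j i : Nat) (oc : Int), text.length - i ≤ n →
      i ≤ (wpInner text firstgen secgen j i oc).2 := by
  intro n
  induction n with
  | zero =>
    intro j i oc h
    rw [wpInner]
    split
    · omega
    · simp
  | succ m ih =>
    intro j i oc h
    rw [wpInner]
    split
    · next hg => exact le_trans (by omega) (ih j (i + 1) _ (by omega))
    · simp

-- … and moves it strictly forward when started at i = j < len (for wpOuter's termination)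
theorem wpInner_lt (text : List String) (firstgen : List String) (secgen : List String)
    (i : Nat) (hi : i < text.length) :
    i < (wpInner text firstgen secgen i i 0).2 := by
  rw [wpInner]
  split
  · next hg =>
    exact lt_of_lt_of_le (Nat.lt_succ_self i)
      (wpInner_le text firstgen secgen text.length i (i + 1) _ (by omega))
  · next hg => exact absurd ⟨by omega, hi⟩ hg

-- outer `while i < len(text)` loop
def wpOuter (text : List String) (firstgen : List String) (secgen : List String)
    (i : Nat) (occurences : List Int) : List Int :=
  if h : i < text.length then
    wpOuter text firstgen secgen (wpInner text firstgen secgen i i 0).2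
      (occurences ++ [(wpInner text firstgen secgen i i 0).1])
  else occurences
termination_by text.length - i
decreasing_by
  exact Nat.sub_lt_sub_left h (wpInner_lt text firstgen secgen i h)

def wordProgression (text : List String) (firstgen : List String) (secgen : List String) : List Int :=
  wpOuter text firstgen secgen 0 []

-- ===== PORT B =====
-- prefix[-1] is ported as pyGetD prefix (-1) 0: the fold's accumulator is never
-- empty (it starts as [0]), so this is exact for Python's prefix[-1].
def wordProgression_alt (text : List String) (firstgen : List String) (secgen : List String) : List Int :=
  let fg := PySem.Set.ofList firstgen
  let sg := PySem.Set.ofList secgen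
  let pfx :=
    text.foldl (fun p x =>
      p ++ [PySem.List.pyGetD p (-1) 0 +
        (if x ∈ fg then (4 : Int) else if x ∈ sg then 1 else 0)]) [(0 : Int)]
  let n : Int := text.length
  (PySem.List.pyRange 0 n 100).map (fun i =>
    PySem.List.pyGetD pfx (min (i + 100) n) 0 - PySem.List.pyGetD pfx i 0)

-- ===== PRECONDITION & SPEC =====
def Spec_wordProgression (text : List String) (firstgen : List String) (secgen : List String) (out : List Int) : Prop := out = wordProgression_alt text firstgen secgen
instance (text : List String) (firstgen : List String) (secgen : List String) (out : List Int) : Decidable (Spec_wordProgression text firstgen secgen out) := by unfold Spec_wordProgression; infer_instance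

-- ===== CLAIM (what is proved, stated in full; the proofs are below) =====
def Claim_equal_wordProgression : Prop := ∀ (text : List String) (firstgen : List String) (secgen : List String), Dom_wordProgression text firstgen secgen → Spec_wordProgression text firstgen secgen (wordProgression text firstgen secgen)

-- ===== LEMMAS AND PROOFS =====

-- weight of one element and weighted sum of a list
def pvW (firstgen secgen : List String) (x : String) : Int :=
  if x ∈ firstgen then 4 else if x ∈ secgen then 1 else 0

def pvWsum (firstgen secgen : List String) (l : List String) : Int :=
  (l.map (pvW firstgen secgen)).sum

-- the per-block sums, defined by recursion over block starts
def pvBlocks (text firstgen secgen : List String) (i : Nat) : List Int :=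
  if i < text.length then
    pvWsum firstgen secgen ((text.drop i).take 100) :: pvBlocks text firstgen secgen (i + 100)
  else []
termination_by text.length - i
decreasing_by exact Nat.sub_lt_sub_left (by assumption) (Nat.lt_add_of_pos_right (by decide))

theorem pvWsum_nil (fg sg : List String) : pvWsum fg sg [] = 0 := rfl

theorem pvBlocks_nil (text fg sg : List String) (i : Nat) (h : text.length ≤ i) :
    pvBlocks text fg sg i = [] := by
  rw [pvBlocks]
  simp [show ¬ i < text.length from by omega]

theorem pvWsum_cons (fg sg : List String) (x : String) (l : List String) :
    pvWsum fg sg (x :: l) = pvW fg sg x + pvWsum fg sg l := by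
  simp [pvWsum]

theorem pvWsum_append (fg sg : List String) (l₁ l₂ : List String) :
    pvWsum fg sg (l₁ ++ l₂) = pvWsum fg sg l₁ + pvWsum fg sg l₂ := by
  simp [pvWsum]

-- A's inner loop computes the weighted sum of the block [i, min (j+100) len)
theorem wpInner_eq (text fg sg : List String) (j : Nat) :
    ∀ (n i : Nat) (oc : Int), text.length - i ≤ n → i ≤ j + 100 → i ≤ text.length →
      wpInner text fg sg j i oc =
        (oc + pvWsum fg sg ((text.drop i).take (min (j + 100) text.length - i)),
         min (j + 100) text.length) := by
  intro n
  induction n with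
  | zero =>
    intro i oc hn hij hil
    rw [wpInner]
    split
    · next hg => omega
    · next hg =>
      have hmin : min (j + 100) text.length = i := by omega
      simp [hmin, pvWsum_nil]
  | succ m ih =>
    intro i oc hn hij hil
    rw [wpInner]
    split
    · next hg =>
      rw [ih (i + 1) _ (by omega) (by omega) (by omega)]
      have hdrop : text.drop i = text[i] :: text.drop (i + 1) :=
        List.drop_eq_getElem_cons hg.2
      have hget : text.getD i "" = text[i] := List.getD_eq_getElem text "" hg.2
      have htake : min (j + 100) text.length - i = (min (j + 100) text.length - (i + 1)) + 1 := by
        omega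
      rw [htake, hdrop]
      simp only [List.take_succ_cons, pvWsum_cons, hget, Prod.mk.injEq]
      constructor
      · unfold pvW
        split_ifs <;> ring
      · trivial
    · next hg =>
      have hmin : min (j + 100) text.length = i := by omega
      simp [hmin, pvWsum_nil]
  
-- A's outer loop produces the block list
theorem wpOuter_eq (text fg sg : List String) :
    ∀ (n i : Nat) (acc : List Int), text.length - i ≤ n → i ≤ text.length →
      wpOuter text fg sg i acc = acc ++ pvBlocks text fg sg i := by
  intro n
  induction n with
  | zero =>
    intro i acc hn hil
    rw [wpOuter, pvBlocks]
    have : ¬ i < text.length := by omega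
    simp [this]
  | succ m ih =>
    intro i acc hn hil
    rw [wpOuter, pvBlocks]
    by_cases h : i < text.length
    · simp only [h, dif_pos, if_pos]
      rw [wpInner_eq text fg sg i text.length i 0 (by omega) (by omega) (by omega)]
      have hmin1 : min (i + 100) text.length - i = min 100 (text.length - i) := by omega
      have htk : (text.drop i).take (min (i + 100) text.length - i) = (text.drop i).take 100 := by
        rw [hmin1]
        have hlen : (text.drop i).length = text.length - i := List.length_drop ..
        rw [← hlen, ← List.take_eq_take_min]
      rw [ih (min (i + 100) text.length) _ (by omega) (by omega)]
      have hb : pvBlocks text fg sg (min (i + 100) text.length) = pvBlocks text fg sg (i + 100) := by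
        by_cases hc : i + 100 ≤ text.length
        · have : min (i + 100) text.length = i + 100 := by omega
          rw [this]
        · have h1 : min (i + 100) text.length = text.length := by omega
          rw [h1, pvBlocks_nil text fg sg text.length (by omega),
              pvBlocks_nil text fg sg (i + 100) (by omega)]
      rw [hb, htk]
      simp
    · simp [h]

-- B's prefix-scan list, abstractly
def pvScan (fg sg : List String) (s : Int) : List String → List Int
  | [] => []
  | x :: xs => (s + pvW fg sg x) :: pvScan fg sg (s + pvW fg sg x) xs

-- the fold in B builds p ++ pvScan (last p) ts
theorem foldl_prefix (fg sg : List String) :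
    ∀ (ts : List String) (p : List Int), p ≠ [] →
      ts.foldl (fun p x =>
          p ++ [PySem.List.pyGetD p (-1) 0 +
            (if x ∈ PySem.Set.ofList fg then (4 : Int) else if x ∈ PySem.Set.ofList sg then 1 else 0)]) p
        = p ++ pvScan fg sg (PySem.List.pyGetD p (-1) 0) ts := by
  intro ts
  induction ts with
  | nil => intro p hp; simp [pvScan]
  | cons x xs ih =>
    intro p hp
    simp only [List.foldl_cons]
    have hw : (if x ∈ PySem.Set.ofList fg then (4 : Int) else if x ∈ PySem.Set.ofList sg then 1 else 0)
        = pvW fg sg x := by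
      simp [pvW, PySem.Set.mem_ofList]
    rw [hw, ih _ (by simp), PySem.List.pyGetD_neg_one_append_singleton]
    simp [pvScan]

-- entries of the prefix list are weighted sums of prefixes of text
theorem pvScan_getD (fg sg : List String) :
    ∀ (ts : List String) (s : Int) (k : Nat), k ≤ ts.length →
      (s :: pvScan fg sg s ts).getD k 0 = s + pvWsum fg sg (ts.take k) := by
  intro ts
  induction ts with
  | nil =>
    intro s k hk
    have hk0 : k = 0 := by simpa using hk
    subst hk0
    simp [pvWsum_nil]
  | cons x xs ih =>
    intro s k hk
    cases k with
    | zero => simp [pvWsum_nil]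
    | succ k =>
      simp only [pvScan, List.getD_cons_succ, List.take_succ_cons, pvWsum_cons]
      rw [ih (s + pvW fg sg x) k (by simpa using hk)]
      ring

-- step-100 range: nil and cons forms
theorem pyRange100_nil (a b : Int) (h : b ≤ a) : PySem.List.pyRange a b 100 = [] := by
  rw [PySem.List.pyRange_of_pos a b (by norm_num)]
  simp [show ¬ a < b from by omega]

theorem pyRange100_cons (a b : Int) (h : a < b) :
    PySem.List.pyRange a b 100 = a :: PySem.List.pyRange (a + 100) b 100 := by
  rw [PySem.List.pyRange_of_pos a b (by norm_num), PySem.List.pyRange_of_pos (a + 100) b (by norm_num)]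
  by_cases h2 : a + 100 < b
  · have hn : ((b - a + 100 - 1) / 100).toNat = ((b - (a + 100) + 100 - 1) / 100).toNat + 1 := by
      omega
    rw [if_pos h, if_pos h2, hn, List.range_succ_eq_map]
    simp only [List.map_cons, List.map_map, List.cons.injEq]
    constructor
    · simp
    · apply List.map_congr_left
      intro k _
      simp [Function.comp]
      ring
  · have hn : ((b - a + 100 - 1) / 100).toNat = 1 := by omega
    rw [if_pos h, if_neg h2, hn]
    simp

-- B's comprehension over range(0, n, 100) produces the same block list
theorem alt_blocks (text fg sg : List String) (pfx : List Int)
    (hpre : ∀ k : Nat, k ≤ text.length → pfx.getD k 0 = pvWsum fg sg (text.take k)) :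
    ∀ (n i : Nat), text.length - i ≤ n →
      (PySem.List.pyRange (i : Int) (text.length : Int) 100).map (fun j =>
          PySem.List.pyGetD pfx (min (j + 100) (text.length : Int)) 0 -
          PySem.List.pyGetD pfx j 0)
        = pvBlocks text fg sg i := by
  intro n
  induction n with
  | zero =>
    intro i hn
    rw [pyRange100_nil _ _ (by exact_mod_cast (by omega : text.length ≤ i)), pvBlocks]
    simp [show ¬ i < text.length from by omega]
  | succ m ih =>
    intro i hn
    by_cases h : i < text.length
    · rw [pyRange100_cons _ _ (by exact_mod_cast h), pvBlocks, if_pos h]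
      simp only [List.map_cons]
      have hcast : ((i : Int) + 100) = ((i + 100 : Nat) : Int) := by push_cast; ring
      have htail : (PySem.List.pyRange ((i : Int) + 100) (text.length : Int) 100).map (fun j =>
          PySem.List.pyGetD pfx (min (j + 100) (text.length : Int)) 0 -
          PySem.List.pyGetD pfx j 0) = pvBlocks text fg sg (i + 100) := by
        rw [hcast]
        exact ih (i + 100) (by omega)
      rw [htail]
      congr 1
      -- head: prefix difference = block sum
      have hm : min ((i : Int) + 100) (text.length : Int) = ((min (i + 100) text.length : Nat) : Int) := by
        push_cast; omega
      rw [hm, PySem.List.pyGetD_natCast, PySem.List.pyGetD_natCast,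
          hpre _ (by omega), hpre i (by omega)]
      have hsplit : text.take (min (i + 100) text.length)
          = text.take i ++ (text.drop i).take (min (i + 100) text.length - i) := by
        rw [← List.take_add]
        congr 1
        omega
      rw [hsplit, pvWsum_append]
      have hmin1 : min (i + 100) text.length - i = min 100 (text.length - i) := by omega
      have htk : (text.drop i).take (min (i + 100) text.length - i) = (text.drop i).take 100 := by
        rw [hmin1]
        have hlen : (text.drop i).length = text.length - i := List.length_drop ..
        rw [← hlen, ← List.take_eq_take_min]
      rw [htk]
      ring
    · rw [pyRange100_nil _ _ (by exact_mod_cast (by omega : text.length ≤ i)), pvBlocks]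
      simp [h]

theorem alt_eq (text fg sg : List String) :
    wordProgression_alt text fg sg = pvBlocks text fg sg 0 := by
  show (PySem.List.pyRange 0 (text.length : Int) 100).map (fun i =>
      PySem.List.pyGetD (text.foldl (fun p x =>
          p ++ [PySem.List.pyGetD p (-1) 0 +
            (if x ∈ PySem.Set.ofList fg then (4 : Int) else if x ∈ PySem.Set.ofList sg then 1 else 0)])
        [(0 : Int)]) (min (i + 100) (text.length : Int)) 0 -
      PySem.List.pyGetD (text.foldl (fun p x =>
          p ++ [PySem.List.pyGetD p (-1) 0 +
            (if x ∈ PySem.Set.ofList fg then (4 : Int) else if x ∈ PySem.Set.ofList sg then 1 else 0)])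
        [(0 : Int)]) i 0) = pvBlocks text fg sg 0
  rw [foldl_prefix fg sg text [(0 : Int)] (by simp)]
  have hpre : ∀ k : Nat, k ≤ text.length →
      ([(0 : Int)] ++ pvScan fg sg (PySem.List.pyGetD [(0 : Int)] (-1) 0) text).getD k 0
        = pvWsum fg sg (text.take k) := by
    intro k hk
    have h0 : PySem.List.pyGetD [(0 : Int)] (-1) 0 = 0 := by
      simp [PySem.List.pyGetD, PySem.List.pyGet?, PySem.List.pyIdx?]
    rw [h0]
    have := pvScan_getD fg sg text 0 k hk
    simpa using this
  have h := alt_blocks text fg sg _ hpre text.length 0 (by omega)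
  simpa using h

-- ===== VERDICT (by name: the statement is the Claim_ definition above) =====
theorem wordProgression_spec : Claim_equal_wordProgression := by
  intro text fg sg _
  unfold Spec_wordProgression wordProgression
  rw [wpOuter_eq text fg sg text.length 0 [] (by omega) (by omega), alt_eq]
  simp
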